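-- pv_equiv track=rewrite | github.com/taggedzi/tz-player | src/tz_player/visualizers/vu.py | _color_meter
-- ===== SOURCE A (Python) =====
-- def _color_meter(fill: int, empty: int, width: int, ansi_enabled: bool) -> str:
--     if not ansi_enabled:
--         return ("#" * fill) + ("-" * empty)
--     green_end = int(width * 0.7)
--     yellow_end = int(width * 0.9)
--     parts: list[str] = []
--     for idx in range(fill):
--         if idx < green_end:
--             parts.append("\x1b[38;2;53;230;138m#\x1b[0m")
--         elif idx < yellow_end:
--             parts.append("\x1b[38;2;242;201;76m#\x1b[0m")
--         else:
--             parts.append("\x1b[38;2;255;90;54m#\x1b[0m")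
--     if empty > 0:
--         parts.append("-" * empty)
--     return "".join(parts)
-- ===== SOURCE B (Python) =====
-- _GREEN = "\x1b[38;2;53;230;138m#\x1b[0m"
-- _YELLOW = "\x1b[38;2;242;201;76m#\x1b[0m"
-- _RED = "\x1b[38;2;255;90;54m#\x1b[0m"
--
--
-- def _color_meter(fill: int, empty: int, width: int, ansi_enabled: bool) -> str:
--     if not ansi_enabled:
--         return ("#" * fill) + ("-" * empty)
--     green_end = int(width * 0.7)
--     yellow_end = int(width * 0.9)
--     f = max(fill, 0)
--     b1 = min(max(green_end, 0), f)
--     b2 = min(max(yellow_end, b1), f)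
--     return _GREEN * b1 + _YELLOW * (b2 - b1) + _RED * (f - b2) + "-" * empty
-- ===== Notes on version B (the rewrite author's own statement) =====
-- stated objective: simpler
-- what changed: Replaces the per-index loop that classifies each fill position with closed-form segment arithmetic: clamp the two color boundaries into [0, fill] and emit three string repetitions plus the dash tail.
import Mathlib
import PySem

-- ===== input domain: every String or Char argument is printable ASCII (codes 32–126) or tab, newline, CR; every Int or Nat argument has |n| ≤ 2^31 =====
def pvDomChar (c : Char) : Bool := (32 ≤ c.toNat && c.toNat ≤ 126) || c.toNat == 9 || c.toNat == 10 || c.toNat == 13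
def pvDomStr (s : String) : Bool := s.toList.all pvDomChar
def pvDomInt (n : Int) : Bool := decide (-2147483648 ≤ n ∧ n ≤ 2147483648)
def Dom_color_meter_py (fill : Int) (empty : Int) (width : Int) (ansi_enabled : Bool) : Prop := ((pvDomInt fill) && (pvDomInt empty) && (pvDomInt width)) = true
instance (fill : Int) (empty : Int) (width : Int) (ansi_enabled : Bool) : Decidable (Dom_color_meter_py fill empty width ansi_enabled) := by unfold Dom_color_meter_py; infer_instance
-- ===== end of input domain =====

-- B replaces A's per-index classification loop with closed-form segment arithmetic
-- (clamp the two color boundaries into [0, fill], then three string repetitions): simpler decomposition, same value.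

-- ===== PORT A =====
-- IEEE-754 doubles: 0.7 = pvM7 / 2^53 and 0.9 = pvM9 / 2^53 exactly.
def pvM7 : Nat := 6305039478318694
def pvM9 : Nat := 8106479329266893
-- Exact port of Python's `int(w * c)` for c = m / 2^53: the exact product w*m/2^53 is
-- rounded to 53 significant bits (round half to even, as IEEE-754 multiplication does;
-- no overflow/subnormals for |w| ≤ 2^31), then truncated toward zero.
def pvTruncMul (w : Int) (m : Nat) : Int :=
  if w = 0 then 0 else
  let sign : Int := if 0 < w then 1 else -1
  let n : Nat := w.natAbs * m
  let s : Nat := Nat.log2 n + 1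
  if s ≤ 53 then sign * ((n / 2 ^ 53 : Nat) : Int)
  else
    let d := s - 53
    let q := n / 2 ^ d
    let r := n % 2 ^ d
    let half := 2 ^ (d - 1)
    let q' := if half < r ∨ (r = half ∧ q % 2 = 1) then q + 1 else q
    sign * (((q' * 2 ^ d) / 2 ^ 53 : Nat) : Int)

def pvGREEN : String := "\x1b[38;2;53;230;138m#\x1b[0m"
def pvYELLOW : String := "\x1b[38;2;242;201;76m#\x1b[0m"
def pvRED : String := "\x1b[38;2;255;90;54m#\x1b[0m"

def color_meter_py (fill : Int) (empty : Int) (width : Int) (ansi_enabled : Bool) : String :=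
  if !ansi_enabled then
    String.ofList (PySem.List.pyRepeat "#".toList fill ++ PySem.List.pyRepeat "-".toList empty)
  else
    let green_end := pvTruncMul width pvM7
    let yellow_end := pvTruncMul width pvM9
    let parts : List String := (PySem.List.pyRange 0 fill 1).foldl
      (fun parts idx =>
        parts ++ [if idx < green_end then pvGREEN else if idx < yellow_end then pvYELLOW else pvRED]) []
    let parts := if 0 < empty then parts ++ [String.ofList (PySem.List.pyRepeat "-".toList empty)] else parts
    PySem.Str.join "" parts

-- ===== PORT B =====
def color_meter_py_alt (fill : Int) (empty : Int) (width : Int) (ansi_enabled : Bool) : String :=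
  if !ansi_enabled then
    String.ofList (PySem.List.pyRepeat "#".toList fill ++ PySem.List.pyRepeat "-".toList empty)
  else
    let green_end := pvTruncMul width pvM7
    let yellow_end := pvTruncMul width pvM9
    let f := max fill 0
    let b1 := min (max green_end 0) f
    let b2 := min (max yellow_end b1) f
    String.ofList (PySem.List.pyRepeat pvGREEN.toList b1 ++ PySem.List.pyRepeat pvYELLOW.toList (b2 - b1)
      ++ PySem.List.pyRepeat pvRED.toList (f - b2) ++ PySem.List.pyRepeat "-".toList empty)

-- ===== PRECONDITION & SPEC =====
def Spec_color_meter_py (fill : Int) (empty : Int) (width : Int) (ansi_enabled : Bool) (out : String) : Prop := out = color_meter_py_alt fill empty width ansi_enabled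
instance (fill : Int) (empty : Int) (width : Int) (ansi_enabled : Bool) (out : String) : Decidable (Spec_color_meter_py fill empty width ansi_enabled out) := by unfold Spec_color_meter_py; infer_instance

-- ===== CLAIM (what is proved, stated in full; the proofs are below) =====
def Claim_equal_color_meter_py : Prop := ∀ (fill : Int) (empty : Int) (width : Int) (ansi_enabled : Bool), Dom_color_meter_py fill empty width ansi_enabled → Spec_color_meter_py fill empty width ansi_enabled (color_meter_py fill empty width ansi_enabled)

-- ===== LEMMAS AND PROOFS =====

theorem pvStr_ext (a b : String) (h : a.toList = b.toList) : a = b := by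
  have := congrArg String.ofList h; simpa using this

theorem pvJoin_empty_sep (l : List (List Char)) : PySem.Chars.join [] l = l.flatten := by
  induction l with
  | nil => rw [PySem.Chars.join_nil]; rfl
  | cons x t ih =>
    cases t with
    | nil => rw [PySem.Chars.join_singleton]; simp
    | cons y t2 => rw [PySem.Chars.join_cons_cons]; simp_all

-- the classification loop over range(fill) produces exactly three replicate segments
theorem pvSeg (g y : Int) (n : Nat) :
    ((PySem.List.pyRange 0 (n : Int) 1).map fun idx =>
        if idx < g then pvGREEN else if idx < y then pvYELLOW else pvRED)
    = List.replicate (min (max g 0) (n : Int)).toNat pvGREEN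
      ++ List.replicate ((min (max y (min (max g 0) (n : Int))) (n : Int)
            - min (max g 0) (n : Int))).toNat pvYELLOW
      ++ List.replicate (((n : Int) - min (max y (min (max g 0) (n : Int))) (n : Int))).toNat pvRED := by
  induction n with
  | zero =>
    rw [PySem.List.pyRange_one_eq_nil (by omega)]
    simp
  | succ n ih =>
    have hcast : ((n + 1 : Nat) : Int) = (n : Int) + 1 := by push_cast; ring
    rw [hcast, PySem.List.pyRange_one_succ_right (by positivity), List.map_append, ih]
    simp only [List.map_cons, List.map_nil]
    by_cases hg : (n : Int) < g
    · -- green grows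
      have e1 : (min (max g 0) ((n:Int)+1)).toNat = (min (max g 0) (n:Int)).toNat + 1 := by omega
      have e2 : (min (max y (min (max g 0) ((n:Int)+1))) ((n:Int)+1)
            - min (max g 0) ((n:Int)+1))
          = (min (max y (min (max g 0) (n:Int))) (n:Int) - min (max g 0) (n:Int)) := by omega
      have e3 : ((n:Int)+1 - min (max y (min (max g 0) ((n:Int)+1))) ((n:Int)+1))
          = ((n:Int) - min (max y (min (max g 0) (n:Int))) (n:Int)) := by omega
      have h2z : (min (max y (min (max g 0) (n:Int))) (n:Int) - min (max g 0) (n:Int)).toNat = 0 := by omega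
      have h3z : ((n:Int) - min (max y (min (max g 0) (n:Int))) (n:Int)).toNat = 0 := by omega
      rw [if_pos hg, e1, e2, e3, List.replicate_succ']
      simp [h2z, h3z]
    · by_cases hy : (n : Int) < y
      · -- yellow grows
        have e1 : (min (max g 0) ((n:Int)+1)) = (min (max g 0) (n:Int)) := by omega
        rw [if_neg hg, if_pos hy, e1]
        have e2 : (min (max y (min (max g 0) (n:Int))) ((n:Int)+1)
              - min (max g 0) (n:Int)).toNat
            = (min (max y (min (max g 0) (n:Int))) (n:Int) - min (max g 0) (n:Int)).toNat + 1 := by omega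
        have e3 : ((n:Int)+1 - min (max y (min (max g 0) (n:Int))) ((n:Int)+1)).toNat = 0 := by omega
        have h3z : ((n:Int) - min (max y (min (max g 0) (n:Int))) (n:Int)).toNat = 0 := by omega
        rw [e2, e3, List.replicate_succ']
        simp [h3z]
      · -- red grows
        have e1 : (min (max g 0) ((n:Int)+1)) = (min (max g 0) (n:Int)) := by omega
        rw [if_neg hg, if_neg hy, e1]
        have e2 : (min (max y (min (max g 0) (n:Int))) ((n:Int)+1))
            = (min (max y (min (max g 0) (n:Int))) (n:Int)) := by omega
        rw [e2]
        have e3 : ((n:Int)+1 - min (max y (min (max g 0) (n:Int))) (n:Int)).toNat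
            = ((n:Int) - min (max y (min (max g 0) (n:Int))) (n:Int)).toNat + 1 := by omega
        rw [e3, List.replicate_succ']
        simp

-- A's range(fill) equals the range over the clamped length fill.toNat
theorem pvRangeToNat (fill : Int) :
    PySem.List.pyRange 0 fill 1 = PySem.List.pyRange 0 ((fill.toNat : Nat) : Int) 1 := by
  by_cases h : fill < 0
  · rw [PySem.List.pyRange_one_eq_nil (by omega), PySem.List.pyRange_one_eq_nil (by omega)]
  · rw [Int.toNat_of_nonneg (by omega)]

-- ===== VERDICT (by name: the statement is the Claim_ definition above) =====
theorem color_meter_py_spec : Claim_equal_color_meter_py := by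
  intro fill empty width ansi _
  unfold Spec_color_meter_py color_meter_py color_meter_py_alt
  cases ansi with
  | false => rfl
  | true =>
    rw [if_neg (show ¬((!true) = true) by decide), if_neg (show ¬((!true) = true) by decide)]
    apply pvStr_ext
    dsimp only
    rw [PySem.List.foldl_append_singleton_eq_map, List.nil_append, pvRangeToNat,
      pvSeg (pvTruncMul width pvM7) (pvTruncMul width pvM9) fill.toNat]
    have hmax : max fill 0 = ((fill.toNat : Nat) : Int) := by omega
    rw [hmax, PySem.Str.toList_join]
    by_cases he : 0 < empty
    · rw [if_pos he]
      simp only [List.map_append, List.map_replicate]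
      rw [show ("".toList) = ([] : List Char) from rfl, pvJoin_empty_sep]
      simp [PySem.List.pyRepeat, List.flatten_append]
    · rw [if_neg he]
      simp only [List.map_append, List.map_replicate]
      rw [show ("".toList) = ([] : List Char) from rfl, pvJoin_empty_sep]
      have hz : empty.toNat = 0 := by omega
      simp [PySem.List.pyRepeat, List.flatten_append, hz]
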